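-- pv_equiv track=rewrite | github.com/Sushanth-majeti/RAG-project-with-embeddings-and-vector-database | src/chunking.py | _split_by_tables
-- ===== SOURCE A (Python) =====
-- from typing import List, Dict, Any, Tuple
--
-- def _split_by_tables(text: str) -> List[Tuple[bool, str]]:
--     """
--     Split text by table markers.
--     Tables are detected as lines with | or common table patterns.
--     """
--     parts = []
--     lines = text.split('\n')
--
--     current_block = []
--     is_table = False
--
--     for line in lines:
--         # Simple table detection: lines containing | and multiple cells
--         line_is_table = '|' in line and line.count('|') >= 2
--
--         if line_is_table != is_table:
--             # Boundary between table and non-table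
--             if current_block:
--                 parts.append((is_table, '\n'.join(current_block)))
--                 current_block = []
--             is_table = line_is_table
--
--         current_block.append(line)
--
--     if current_block:
--         parts.append((is_table, '\n'.join(current_block)))
--
--     return parts
-- ===== SOURCE B (Python) =====
-- from typing import List, Tuple
--
-- def _split_by_tables(text: str) -> List[Tuple[bool, str]]:
--     """Split text into maximal runs of table / non-table lines (two-pointer run scan)."""
--     def key(line: str) -> bool:
--         return '|' in line and line.count('|') >= 2
--
--     lines = text.split('\n')
--     parts = []
--     i = 0
--     n = len(lines)
--     while i < n:
--         k = key(lines[i])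
--         j = i + 1
--         while j < n and key(lines[j]) == k:
--             j += 1
--         parts.append((k, '\n'.join(lines[i:j])))
--         i = j
--     return parts
-- ===== Notes on version B (the rewrite author's own statement) =====
-- stated objective: alternative
-- what changed: Replaces A's current_block/is_table boundary state machine with a two-pointer run scan that, for each maximal run of consecutive lines with the same table-key, emits one (key, joined-run) block directly.
import Mathlib
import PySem

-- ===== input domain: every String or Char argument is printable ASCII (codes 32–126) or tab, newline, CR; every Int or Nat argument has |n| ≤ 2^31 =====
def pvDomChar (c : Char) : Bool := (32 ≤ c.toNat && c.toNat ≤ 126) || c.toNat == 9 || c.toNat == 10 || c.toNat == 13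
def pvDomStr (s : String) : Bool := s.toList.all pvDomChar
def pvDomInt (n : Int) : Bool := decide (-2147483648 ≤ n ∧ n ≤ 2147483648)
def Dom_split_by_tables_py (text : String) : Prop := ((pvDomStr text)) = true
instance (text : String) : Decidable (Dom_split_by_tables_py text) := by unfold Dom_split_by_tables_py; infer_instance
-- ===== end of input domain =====

-- B replaces A's current_block/is_table boundary state machine by a two-pointer run scan
-- (for each maximal run of lines with equal table-key, emit one joined block); same return value.

-- line_is_table = '|' in line and line.count('|') >= 2   (identical key in A and B)
def pvKey (line : String) : Bool :=
  PySem.Str.isIn "|" line && decide (2 ≤ PySem.Str.count line "|")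

-- ===== PORT A =====
-- one iteration of A's for-loop; state = (parts, current_block, is_table)
def pvAStep (st : List (Bool × String) × List String × Bool) (line : String) :
    List (Bool × String) × List String × Bool :=
  let lineIsTable := pvKey line
  if lineIsTable != st.2.2 then
    let parts := if st.2.1 ≠ [] then st.1 ++ [(st.2.2, PySem.Str.join "\n" st.2.1)] else st.1
    (parts, [line], lineIsTable)
  else
    (st.1, st.2.1 ++ [line], st.2.2)

-- sep "\n" is nonempty, so split? is always some; .getD [] is never the default.
-- the final 'if current_block: parts.append(...)' flush
def pvAFlush (st : List (Bool × String) × List String × Bool) : List (Bool × String) :=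
  if st.2.1 ≠ [] then st.1 ++ [(st.2.2, PySem.Str.join "\n" st.2.1)] else st.1

def split_by_tables_py (text : String) : List (Bool × String) :=
  let lines := (PySem.Str.split? text "\n").getD []
  pvAFlush (lines.foldl pvAStep ([], [], false))

-- ===== PORT B =====
-- B's recursive run-splitter: the inner 'while j < n and key(lines[j]) == k: j += 1'
-- scan is the takeWhile/dropWhile split of the tail at the current key.
def pvBGroups : List String → List (Bool × String)
  | [] => []
  | l :: ls =>
    let k := pvKey l
    let run := l :: ls.takeWhile (fun x => pvKey x == k)
    let rest := ls.dropWhile (fun x => pvKey x == k)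
    (k, PySem.Str.join "\n" run) :: pvBGroups rest
termination_by ls => ls.length
decreasing_by
  simpa using Nat.lt_succ_of_le (List.length_dropWhile_le _ _)

def split_by_tables_py_alt (text : String) : List (Bool × String) :=
  pvBGroups ((PySem.Str.split? text "\n").getD [])

-- ===== PRECONDITION & SPEC =====
def Spec_split_by_tables_py (text : String) (out : List (Bool × String)) : Prop := out = split_by_tables_py_alt text
instance (text : String) (out : List (Bool × String)) : Decidable (Spec_split_by_tables_py text out) := by unfold Spec_split_by_tables_py; infer_instance

-- ===== CLAIM (what is proved, stated in full; the proofs are below) =====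
def Claim_equal_split_by_tables_py : Prop := ∀ (text : String), Dom_split_by_tables_py text → Spec_split_by_tables_py text (split_by_tables_py text)

-- ===== LEMMAS AND PROOFS =====

-- A's loop, seen from a state with nonempty current_block, emits blocks by runs:
-- pvGo is that intermediate shape (accumulated block + remaining lines).
def pvGo (b : Bool) (acc : List String) : List String → List (Bool × String)
  | [] => [(b, PySem.Str.join "\n" acc)]
  | l :: ls =>
    if pvKey l == b then pvGo b (acc ++ [l]) ls
    else (b, PySem.Str.join "\n" acc) :: pvGo (pvKey l) [l] ls

lemma pvGo_eq_bGroups : ∀ (rest : List String) (acc : List String) (b : Bool),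
    pvGo b acc rest =
      (b, PySem.Str.join "\n" (acc ++ rest.takeWhile (fun x => pvKey x == b))) ::
        pvBGroups (rest.dropWhile (fun x => pvKey x == b)) := by
  intro rest
  induction rest with
  | nil => intro acc b; simp [pvGo, pvBGroups]
  | cons l ls ih =>
    intro acc b
    by_cases hk : pvKey l == b
    · have hb : pvKey l = b := by simpa using hk
      simp [pvGo, hk, ih (acc ++ [l]) b, List.takeWhile_cons, List.dropWhile_cons, hb]
    · have hb : ¬ pvKey l = b := by simpa using hk
      simp only [pvGo, if_neg hk]
      rw [ih [l] (pvKey l)]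
      simp [pvBGroups, List.takeWhile_cons, List.dropWhile_cons, hb]

lemma pvAloop_eq_go : ∀ (rest : List String) (parts : List (Bool × String))
    (cur : List String) (b : Bool), cur ≠ [] →
    pvAFlush (rest.foldl pvAStep (parts, cur, b)) = parts ++ pvGo b cur rest := by
  intro rest
  induction rest with
  | nil =>
    intro parts cur b hcur
    simp [pvAFlush, pvGo, hcur]
  | cons l ls ih =>
    intro parts cur b hcur
    by_cases hk : pvKey l == b
    · have hne : (pvKey l != b) = false := by simpa using hk
      have : pvAStep (parts, cur, b) l = (parts, cur ++ [l], b) := by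
        simp [pvAStep, hne]
      rw [List.foldl_cons, this, ih parts (cur ++ [l]) b (by simp)]
      simp [pvGo, hk]
    · have hne : (pvKey l != b) = true := by simpa using hk
      have : pvAStep (parts, cur, b) l =
          (parts ++ [(b, PySem.Str.join "\n" cur)], [l], pvKey l) := by
        simp [pvAStep, hne, hcur]
      rw [List.foldl_cons, this,
        ih (parts ++ [(b, PySem.Str.join "\n" cur)]) [l] (pvKey l) (by simp)]
      simp [pvGo, hk]

lemma pvAStep_init (l : String) :
    pvAStep ([], [], false) l = ([], [l], pvKey l) := by
  cases h : pvKey l <;> simp [pvAStep, h]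

-- ===== VERDICT (by name: the statement is the Claim_ definition above) =====
theorem split_by_tables_py_spec : Claim_equal_split_by_tables_py := by
  intro text _
  unfold Spec_split_by_tables_py split_by_tables_py split_by_tables_py_alt
  cases hls : (PySem.Str.split? text "\n").getD [] with
  | nil => simp [pvAFlush, pvBGroups]
  | cons l ls =>
    simp only [List.foldl_cons, pvAStep_init]
    rw [pvAloop_eq_go ls [] [l] (pvKey l) (by simp), pvGo_eq_bGroups]
    simp [pvBGroups]
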